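-- pv_equiv track=rewrite | github.com/OneKekBer/matura-z-informatyki | 2021/1/1.2.py | func
-- ===== SOURCE A (Python) =====
-- def func(n):
--    sqr = 1
--    answ = 0
--    while n > 0:
--       digit = n % 10 # div
--       n  = n // 10 # mod
--       liczba = 9 - digit
--       answ += liczba * sqr
--       sqr *= 10
--
--    return answ
-- ===== SOURCE B (Python) =====
-- def func(n):
--     if n <= 0:
--         return 0
--     r = 9
--     while r < n:
--         r = r * 10 + 9
--     return r - n
-- ===== Notes on version B (the rewrite author's own statement) =====
-- stated objective: simpler
-- what changed: Instead of extracting each digit and accumulating its nines-complement per decimal place, B builds the smallest all-nines repunit at least n with one multiply-add loop and returns repunit minus n (no divmod, no place-value accumulator).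
import Mathlib
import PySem

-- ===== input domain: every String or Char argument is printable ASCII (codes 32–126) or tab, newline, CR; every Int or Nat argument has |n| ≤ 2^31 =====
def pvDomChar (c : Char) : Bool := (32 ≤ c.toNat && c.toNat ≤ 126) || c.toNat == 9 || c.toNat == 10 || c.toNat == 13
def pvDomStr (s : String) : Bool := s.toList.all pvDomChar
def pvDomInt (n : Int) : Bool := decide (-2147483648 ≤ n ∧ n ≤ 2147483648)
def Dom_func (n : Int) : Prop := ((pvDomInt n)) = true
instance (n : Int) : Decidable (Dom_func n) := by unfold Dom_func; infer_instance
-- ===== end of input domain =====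

-- B replaces A's per-digit extraction loop (divmod + place-value accumulator) by building the
-- smallest all-nines repunit ≥ n with a single multiply-add loop and returning repunit - n (simpler).

-- ===== PORT A =====
-- the while loop of A: state (n, sqr, answ)
def funcLoop (n sqr answ : Int) : Int :=
  if 0 < n then
    funcLoop (PySem.Int.floordiv n 10) (sqr * 10) (answ + (9 - PySem.Int.mod n 10) * sqr)
  else answ
termination_by n.toNat
decreasing_by
  have h10 : (0:Int) < 10 := by norm_num
  rw [PySem.Int.floordiv_eq_ediv_of_pos h10]
  omega

def func (n : Int) : Int := funcLoop n 1 0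

-- ===== PORT B =====
-- the while loop of B: r grows 9, 99, 999, … until r ≥ n (r stays ≥ 0, carried as a proof for termination)
def repLoop (n : Int) (r : Int) (hr : 0 ≤ r) : Int :=
  if r < n then repLoop n (r * 10 + 9) (by omega) else r
termination_by (n - r).toNat
decreasing_by omega

def func_alt (n : Int) : Int :=
  if n ≤ 0 then 0 else repLoop n 9 (by omega) - n

-- ===== PRECONDITION & SPEC =====
def Spec_func (n : Int) (out : Int) : Prop := out = func_alt n
instance (n : Int) (out : Int) : Decidable (Spec_func n out) := by unfold Spec_func; infer_instance

-- ===== CLAIM (what is proved, stated in full; the proofs are below) =====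
def Claim_equal_func : Prop := ∀ (n : Int), Dom_func n → Spec_func n (func n)

-- ===== LEMMAS AND PROOFS =====

-- stepping the repunit start: repLoop n (10r+9) = 10 * repLoop (n//10) r + 9 (for n ≥ 1)
theorem repLoop_step (n : Int) (hn : 0 < n) (r : Int) (hr : 0 ≤ r) :
    repLoop n (r * 10 + 9) (by omega) =
      10 * repLoop (PySem.Int.floordiv n 10) r hr + 9 := by
  have h10 : (0:Int) < 10 := by norm_num
  rw [PySem.Int.floordiv_eq_ediv_of_pos h10]
  generalize hq : n / 10 = q
  have hqr : 10 * q ≤ n ∧ n < 10 * q + 10 := by omega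
  clear hq hn
  fun_induction repLoop q r hr with
  | case1 r hr hlt ih =>
    rw [repLoop]
    have : r * 10 + 9 < n := by omega
    rw [if_pos this]
    rw [ih]
  | case2 r hr hge =>
    rw [repLoop]
    have : ¬ r * 10 + 9 < n := by omega
    rw [if_neg this]
    ring

-- A's loop computes answ + sqr * (repunit(n) - n) for positive n
theorem funcLoop_eq (k : Nat) : ∀ n : Int, n.toNat ≤ k → 0 < n → ∀ sqr answ : Int,
    funcLoop n sqr answ = answ + sqr * (repLoop n 9 (by omega) - n) := by
  induction k with
  | zero => intro n hk hn; omega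
  | succ k ih =>
    intro n hk hn sqr answ
    have h10 : (0:Int) < 10 := by norm_num
    rw [funcLoop, if_pos hn]
    by_cases h9 : n ≤ 9
    · have hfd : PySem.Int.floordiv n 10 = 0 := by
        rw [PySem.Int.floordiv_eq_ediv_of_pos h10]; omega
      have hm : PySem.Int.mod n 10 = n := by
        rw [PySem.Int.mod_eq_emod_of_pos h10]; omega
      rw [hfd, hm, funcLoop, if_neg (by omega)]
      rw [repLoop, if_neg (by omega)]
      ring
    · have hmb : 0 ≤ PySem.Int.mod n 10 ∧ PySem.Int.mod n 10 < 10 := by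
        rw [PySem.Int.mod_eq_emod_of_pos h10]; omega
      have hid : PySem.Int.floordiv n 10 * 10 + PySem.Int.mod n 10 = n :=
        PySem.Int.floordiv_mul_add_mod n 10
      have hfb : 0 < PySem.Int.floordiv n 10 := by omega
      have hfk : (PySem.Int.floordiv n 10).toNat ≤ k := by
        have : PySem.Int.floordiv n 10 = n / 10 := PySem.Int.floordiv_eq_ediv_of_pos h10
        omega
      rw [ih _ hfk hfb]
      -- repunit step: repLoop n 9 = 10 * repLoop (n // 10) 9 + 9
      have hstep := repLoop_step n hn 0 (le_refl 0)
      norm_num at hstep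
      rw [show n / 10 = PySem.Int.floordiv n 10 from (PySem.Int.floordiv_eq_ediv_of_pos h10).symm] at hstep
      have h0 : repLoop (PySem.Int.floordiv n 10) 0 (le_refl 0) =
          repLoop (PySem.Int.floordiv n 10) 9 (by omega) := by
        rw [repLoop, if_pos hfb]; norm_num
      rw [h0] at hstep
      rw [hstep]
      linear_combination (-sqr) * hid

theorem func_spec : Claim_equal_func := by
  intro n _
  unfold Spec_func func func_alt
  by_cases hn : 0 < n
  · rw [if_neg (by omega), funcLoop_eq n.toNat n (le_refl _) hn]
    ring
  · rw [funcLoop, if_neg hn, if_pos (by omega)]
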